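-- pv_equiv track=rewrite | github.com/hayyp/b17 | remote.py | normalize_linebreak
-- ===== SOURCE A (Python) =====
-- def normalize_linebreak(text: str) -> str:
--     lines = text.splitlines()
--     normalized_text = ''
--     for i, line in enumerate(lines):
--         stripped_line = line.strip()
--         if stripped_line:
--             normalized_text += stripped_line + '\n'
--             if i < len(lines) - 1 and lines[i + 1].strip():
--                 normalized_text += '\n'
--         elif normalized_text and not normalized_text.endswith('\n\n'):
--             normalized_text += '\n'
--     return normalized_text
-- ===== SOURCE B (Python) =====
-- def normalize_linebreak(text: str) -> str:
--     lines = text.splitlines()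
--     content = [s for s in (l.strip() for l in lines) if s]
--     if not content:
--         return ''
--     result = '\n\n'.join(content) + '\n'
--     if not lines[-1].strip():
--         result += '\n'
--     return result
-- ===== Notes on version B (the rewrite author's own statement) =====
-- stated objective: simpler
-- what changed: A's single stateful accumulator with an index look-ahead at lines[i+1] and endswith bookkeeping is replaced by a filter-join decomposition: collect the stripped non-blank lines, join them with a blank-line separator plus a final newline, and append one extra newline exactly when the last splitline is blank.
import Mathlib
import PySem

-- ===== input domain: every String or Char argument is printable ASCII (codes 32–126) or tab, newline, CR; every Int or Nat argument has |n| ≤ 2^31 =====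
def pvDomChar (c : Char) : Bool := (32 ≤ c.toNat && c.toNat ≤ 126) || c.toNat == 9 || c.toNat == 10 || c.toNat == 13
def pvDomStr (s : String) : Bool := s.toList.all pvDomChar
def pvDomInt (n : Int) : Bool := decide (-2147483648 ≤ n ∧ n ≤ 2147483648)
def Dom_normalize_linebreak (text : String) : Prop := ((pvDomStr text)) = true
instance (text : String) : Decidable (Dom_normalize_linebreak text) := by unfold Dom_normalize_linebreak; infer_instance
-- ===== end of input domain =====

-- B replaces A's single stateful accumulator (index look-ahead + endswith bookkeeping) by a
-- filter → join → trailing-blank-check decomposition; objective: simpler, same cost.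

-- ===== PORT A =====
-- Literal port of A: fold over enumerate(lines) with the index look-ahead lines[i+1]
-- (pyGetD's default "" is only read when the guard i < len-1 fails, mirroring `and` short-circuit).
def normalize_linebreak (text : String) : String :=
  let lines := PySem.Str.splitlines text
  (PySem.List.enumerate lines).foldl
    (fun acc p =>
      let stripped := PySem.Str.strip p.2
      if stripped ≠ "" then
        let acc1 := acc ++ stripped ++ "\n"
        if p.1 < (lines.length : Int) - 1 ∧
            PySem.Str.strip (PySem.List.pyGetD lines (p.1 + 1) "") ≠ "" then
          acc1 ++ "\n"
        else acc1
      else if acc ≠ "" ∧ PySem.Str.endswith acc "\n\n" = false then acc ++ "\n"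
      else acc)
    ""

-- ===== PORT B =====
-- Literal port of B (Source B): filter the stripped non-blank lines, join, then the trailing check on lines[-1].
def normalize_linebreak_alt (text : String) : String :=
  let lines := PySem.Str.splitlines text
  let content := (lines.map PySem.Str.strip).filter (fun s => s ≠ "")
  if content = [] then ""
  else
    let result := PySem.Str.join "\n\n" content ++ "\n"
    -- lines[-1]: in range because content ≠ [] forces lines ≠ []
    if PySem.Str.strip (PySem.List.pyGetD lines (-1) "") = "" then result ++ "\n"
    else result

-- ===== PRECONDITION & SPEC =====
def Spec_normalize_linebreak (text : String) (out : String) : Prop := out = normalize_linebreak_alt text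
instance (text : String) (out : String) : Decidable (Spec_normalize_linebreak text out) := by unfold Spec_normalize_linebreak; infer_instance

-- ===== CLAIM (what is proved, stated in full; the proofs are below) =====
def Claim_equal_normalize_linebreak : Prop := ∀ (text : String), Dom_normalize_linebreak text → Spec_normalize_linebreak text (normalize_linebreak text)

-- ===== LEMMAS AND PROOFS =====

-- Char-level model of A's loop body, look-ahead expressed structurally on the remaining lines.
def pvStepA (acc : List Char) (l : List Char) (rest : List (List Char)) : List Char :=
  if PySem.Chars.strip l ≠ [] then
    acc ++ PySem.Chars.strip l ++ ['\n'] ++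
      (if PySem.Chars.strip (rest.headD []) ≠ [] then ['\n'] else [])
  else if acc ≠ [] ∧ PySem.Chars.endswith acc ['\n', '\n'] = false then acc ++ ['\n']
  else acc

def pvGA (acc : List Char) : List (List Char) → List Char
  | [] => acc
  | l :: rest => pvGA (pvStepA acc l rest) rest

-- Char-level model of B.
def pvC (L : List (List Char)) : List (List Char) :=
  (L.map PySem.Chars.strip).filter (fun s => s ≠ [])

def pvTrailB (L : List (List Char)) (b : Bool) : List Char :=
  match L.getLast? with
  | some l => if PySem.Chars.strip l = [] then ['\n'] else []
  | none => if b then ['\n'] else []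

def pvFB (L : List (List Char)) : List Char :=
  if pvC L = [] then []
  else PySem.Chars.join ['\n', '\n'] (pvC L) ++ ['\n'] ++ pvTrailB L false

def pvOk (c : List Char) : Prop := c ≠ [] ∧ c.getLast? ≠ some '\n'

theorem pv_str_eq_empty (s : String) : (s = "") ↔ s.toList = [] := by
  constructor
  · intro h; subst h; rfl
  · intro h; apply String.toList_inj.mp; simpa using h

theorem pv_nlnl : ("\n\n" : String).toList = ['\n', '\n'] := by decide

theorem pvTrailB_cons (l r : List Char) (rs : List (List Char)) (b b' : Bool) :
    pvTrailB (l :: r :: rs) b = pvTrailB (r :: rs) b' := by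
  unfold pvTrailB
  rw [List.getLast?_cons_cons]
  rcases hgl : (r :: rs).getLast? with _ | x
  · simp at hgl
  · rfl

theorem pv_join_append (sep c : List Char) (cs : List (List Char)) (h : cs ≠ []) :
    PySem.Chars.join sep (cs ++ [c]) = PySem.Chars.join sep cs ++ sep ++ c := by
  induction cs with
  | nil => exact absurd rfl h
  | cons a rest ih =>
    cases rest with
    | nil => simp [PySem.Chars.join_cons_cons, PySem.Chars.join_singleton]
    | cons b rs =>
      have := ih (by simp)
      simp only [List.cons_append] at *
      rw [PySem.Chars.join_cons_cons, PySem.Chars.join_cons_cons, this]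
      simp [List.append_assoc]

-- the last char of a nonempty stripped line is not whitespace (in particular not '\n')
theorem pv_strip_ok (l : List Char) (h : PySem.Chars.strip l ≠ []) : pvOk (PySem.Chars.strip l) := by
  refine ⟨h, ?_⟩
  have hd : PySem.Chars.strip l = (List.dropWhile PySem.Chars.isspace (PySem.Chars.lstrip l).reverse).reverse := by
    simp [PySem.Chars.strip, PySem.Chars.rstrip]
  set t := List.dropWhile PySem.Chars.isspace (PySem.Chars.lstrip l).reverse with ht
  have hne : t ≠ [] := by
    intro h0; apply h; rw [hd, h0]; rfl
  have hhead : PySem.Chars.isspace (t.head hne) = false := List.head_dropWhile_not _ hne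
  rw [hd, List.getLast?_reverse]
  rw [List.head?_eq_some_head hne]
  intro hc
  have : t.head hne = '\n' := by injection hc
  rw [this] at hhead
  exact absurd hhead (by decide)

theorem pv_ok_join (cs : List (List Char)) (h : cs ≠ []) (hok : ∀ c ∈ cs, pvOk c) :
    pvOk (PySem.Chars.join ['\n', '\n'] cs) := by
  induction cs with
  | nil => exact absurd rfl h
  | cons a rest ih =>
    cases rest with
    | nil =>
      simpa [PySem.Chars.join_singleton] using hok a (by simp)
    | cons b rs =>
      have hrec := ih (by simp) (fun c hc => hok c (by simp [hc]))
      rw [PySem.Chars.join_cons_cons]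
      refine ⟨by simp, ?_⟩
      rw [List.getLast?_append_of_ne_nil _ hrec.1]
      exact hrec.2

theorem pv_endswith_single (X : List Char) (h : X.getLast? ≠ some '\n') :
    PySem.Chars.endswith (X ++ ['\n']) ['\n', '\n'] = false := by
  rw [Bool.eq_false_iff]
  intro hc
  obtain ⟨t, ht⟩ := (PySem.Chars.endswith_iff _ _).mp hc
  have h2 : (t ++ ['\n']) ++ ['\n'] = X ++ ['\n'] := by simpa using ht
  have h3 : t ++ ['\n'] = X := List.append_cancel_right h2
  apply h
  rw [← h3]
  simp

theorem pv_endswith_double (X : List Char) :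
    PySem.Chars.endswith (X ++ ['\n'] ++ ['\n']) ['\n', '\n'] = true := by
  rw [PySem.Chars.endswith_iff]
  exact ⟨X, by simp⟩

-- A's loop body on a blank line, from either accumulator shape, yields the b = true shape
theorem pv_step_blank (cs : List (List Char)) (l : List Char) (rest : List (List Char)) (b : Bool)
    (hne : cs ≠ []) (hok : ∀ c ∈ cs, pvOk c) (hl : PySem.Chars.strip l = []) :
    pvStepA (PySem.Chars.join ['\n', '\n'] cs ++ ['\n'] ++ (if b then ['\n'] else [])) l rest
      = PySem.Chars.join ['\n', '\n'] cs ++ ['\n'] ++ ['\n'] := by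
  have hok' := pv_ok_join cs hne hok
  cases b with
  | false =>
    show pvStepA (PySem.Chars.join ['\n', '\n'] cs ++ ['\n'] ++ []) l rest = _
    rw [List.append_nil]
    unfold pvStepA
    rw [if_neg (by simpa using hl), if_pos]
    constructor
    · simp [hok'.1]
    · exact pv_endswith_single _ hok'.2
  | true =>
    show pvStepA (PySem.Chars.join ['\n', '\n'] cs ++ ['\n'] ++ ['\n']) l rest = _
    unfold pvStepA
    rw [if_neg (by simpa using hl), if_neg]
    rintro ⟨_, h2⟩
    rw [pv_endswith_double] at h2
    exact Bool.noConfusion h2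

-- the main loop invariant for A
theorem pv_main (ls : List (List Char)) :
    ∀ (cs : List (List Char)) (b : Bool), cs ≠ [] → (∀ c ∈ cs, pvOk c) →
    (b = false → PySem.Chars.strip (ls.headD []) = []) →
    pvGA (PySem.Chars.join ['\n', '\n'] cs ++ ['\n'] ++ (if b then ['\n'] else [])) ls
      = PySem.Chars.join ['\n', '\n'] (cs ++ pvC ls) ++ ['\n'] ++ pvTrailB ls b := by
  induction ls with
  | nil =>
    intro cs b hne hok hside
    simp [pvGA, pvC, pvTrailB]
  | cons l rest ih =>
    intro cs b hne hok hside
    by_cases hl : PySem.Chars.strip l = []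
    · -- blank line
      rw [pvGA, pv_step_blank cs l rest b hne hok hl]
      have hrw := ih cs true hne hok (by simp)
      rw [if_pos rfl] at hrw
      rw [hrw]
      have hC : pvC (l :: rest) = pvC rest := by simp [pvC, hl]
      rw [hC]
      congr 1
      cases rest with
      | nil => simp [pvTrailB, hl]
      | cons r rs => exact (pvTrailB_cons l r rs b true).symm
    · -- content line: b must be true
      have hb : b = true := by
        cases b with
        | true => rfl
        | false => exact absurd (hside rfl) hl
      subst hb
      have hstep : pvStepA (PySem.Chars.join ['\n', '\n'] cs ++ ['\n'] ++ (if true then ['\n'] else [])) l rest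
          = PySem.Chars.join ['\n', '\n'] (cs ++ [PySem.Chars.strip l]) ++ ['\n'] ++
            (if PySem.Chars.strip (rest.headD []) ≠ [] then ['\n'] else []) := by
        unfold pvStepA
        rw [if_pos (by simpa using hl)]
        rw [pv_join_append _ _ _ hne]
        simp [List.append_assoc]
      rw [pvGA, hstep]
      have hif : (if PySem.Chars.strip (rest.headD []) ≠ [] then (['\n'] : List Char) else [])
          = (if (decide (PySem.Chars.strip (rest.headD []) ≠ []) : Bool) then ['\n'] else []) := by
        simp
      rw [hif]
      have hside' : (decide (PySem.Chars.strip (rest.headD []) ≠ []) : Bool) = false →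
          PySem.Chars.strip (rest.headD []) = [] := by
        intro h0
        simpa using h0
      have hok' : ∀ c ∈ cs ++ [PySem.Chars.strip l], pvOk c := by
        intro c hc
        rcases List.mem_append.mp hc with h1 | h1
        · exact hok c h1
        · simp at h1; subst h1; exact pv_strip_ok l hl
      rw [ih (cs ++ [PySem.Chars.strip l]) _ (by simp) hok' hside']
      have hC : pvC (l :: rest) = PySem.Chars.strip l :: pvC rest := by simp [pvC, hl]
      rw [hC]
      congr 1
      · congr 2
        simp [List.append_assoc]
      · cases rest with
        | nil =>
          have hb0 : (decide (PySem.Chars.strip (([] : List (List Char)).headD []) ≠ []) : Bool) = false := by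
            decide
          rw [hb0]
          simp [pvTrailB, hl]
        | cons r rs => exact (pvTrailB_cons l r rs true _).symm

-- A's loop from the empty accumulator computes B's closed form
theorem pv_core (L : List (List Char)) : pvGA [] L = pvFB L := by
  induction L with
  | nil => simp [pvGA, pvFB, pvC]
  | cons l rest ih =>
    by_cases hl : PySem.Chars.strip l = []
    · have hstep : pvStepA [] l rest = [] := by
        simp [pvStepA, hl]
      rw [pvGA, hstep, ih]
      unfold pvFB
      have hC : pvC (l :: rest) = pvC rest := by simp [pvC, hl]
      rw [hC]
      by_cases hrest : pvC rest = []
      · simp [hrest]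
      · rw [if_neg hrest, if_neg hrest]
        congr 1
        cases rest with
        | nil => exact absurd (by simp [pvC]) hrest
        | cons r rs => exact (pvTrailB_cons l r rs false false).symm
    · have hstep : pvStepA [] l rest = PySem.Chars.join ['\n', '\n'] [PySem.Chars.strip l] ++ ['\n'] ++
          (if PySem.Chars.strip (rest.headD []) ≠ [] then ['\n'] else []) := by
        unfold pvStepA
        rw [if_pos (by simpa using hl), PySem.Chars.join_singleton]
        simp [List.append_assoc]
      rw [pvGA, hstep]
      have hif : (if PySem.Chars.strip (rest.headD []) ≠ [] then (['\n'] : List Char) else [])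
          = (if (decide (PySem.Chars.strip (rest.headD []) ≠ []) : Bool) then ['\n'] else []) := by
        simp
      rw [hif]
      have hside' : (decide (PySem.Chars.strip (rest.headD []) ≠ []) : Bool) = false →
          PySem.Chars.strip (rest.headD []) = [] := by
        intro h0
        simpa using h0
      rw [pv_main rest [PySem.Chars.strip l] _ (by simp)
        (by intro c hc; simp at hc; subst hc; exact pv_strip_ok l hl) hside']
      have hC : pvC (l :: rest) = PySem.Chars.strip l :: pvC rest := by simp [pvC, hl]
      unfold pvFB
      rw [if_neg (by rw [hC]; simp)]
      rw [hC]
      congr 1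
      cases rest with
      | nil =>
        have hb0 : (decide (PySem.Chars.strip (([] : List (List Char)).headD []) ≠ []) : Bool) = false := by
          decide
        rw [hb0]
        simp [pvTrailB, hl]
      | cons r rs => exact (pvTrailB_cons l r rs false _).symm

-- ---- bridge: port A computes pvGA ----
set_option maxHeartbeats 1000000 in
theorem pv_bridgeA (lines : List String) (ls : List String) :
    ∀ (k : Nat) (acc : String), List.drop k lines = ls →
    ((PySem.List.enumerate ls (k : Int)).foldl
      (fun acc p =>
        let stripped := PySem.Str.strip p.2
        if stripped ≠ "" then
          let acc1 := acc ++ stripped ++ "\n"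
          if p.1 < (lines.length : Int) - 1 ∧
              PySem.Str.strip (PySem.List.pyGetD lines (p.1 + 1) "") ≠ "" then
            acc1 ++ "\n"
          else acc1
        else if acc ≠ "" ∧ PySem.Str.endswith acc "\n\n" = false then acc ++ "\n"
        else acc) acc).toList
    = pvGA acc.toList (ls.map String.toList) := by
  induction ls with
  | nil =>
    intro k acc hdrop
    simp [PySem.List.enumerate, pvGA]
  | cons l rest ih =>
    intro k acc hdrop
    have hklen : k < lines.length := by
      by_contra h0
      rw [List.drop_eq_nil_of_le (by omega)] at hdrop
      exact List.cons_ne_nil _ _ hdrop.symm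
    have hlen : lines.length = k + 1 + rest.length := by
      have := congrArg List.length hdrop
      simp [List.length_drop] at this
      omega
    have hdropS : List.drop (k + 1) lines = rest := by
      have h0 : List.drop (k+1) lines = List.tail (List.drop k lines) := by
        rw [← List.drop_drop]
        simp
      rw [h0, hdrop]; rfl
    have hget : PySem.List.pyGetD lines ((k : Int) + 1) "" = rest.headD "" := by
      have h1 : ((k : Int) + 1) = ((k + 1 : Nat) : Int) := by push_cast; ring
      rw [h1, PySem.List.pyGetD_natCast]
      rw [List.getD_eq_getElem?_getD]
      have h2 : lines[(k+1)]? = rest[0]? := by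
        rw [← hdropS, List.getElem?_drop]
      rw [h2]
      cases rest <;> simp
    rw [PySem.List.enumerate_cons, List.foldl_cons]
    have hcond2 : ((k : Int) < (lines.length : Int) - 1 ∧
        PySem.Str.strip (PySem.List.pyGetD lines ((k : Int) + 1) "") ≠ "") ↔
        PySem.Chars.strip ((rest.map String.toList).headD []) ≠ [] := by
      cases rest with
      | nil =>
        constructor
        · rintro ⟨h1, _⟩
          exfalso
          rw [hlen] at h1
          simp only [List.length_nil] at h1
          push_cast at h1
          omega
        · intro h0
          exact absurd rfl h0
      | cons r rs =>
        constructor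
        · rintro ⟨_, h2⟩
          rw [hget] at h2
          simp only [List.headD_cons] at h2
          rw [Ne, pv_str_eq_empty] at h2
          simpa [PySem.Str.toList_strip] using h2
        · intro h0
          refine ⟨?_, ?_⟩
          · rw [hlen]
            simp only [List.length_cons]
            push_cast
            omega
          · rw [hget]
            simp only [List.headD_cons]
            rw [Ne, pv_str_eq_empty]
            simpa [PySem.Str.toList_strip] using h0
    have step : ((fun (acc : String) (p : Int × String) =>
        let stripped := PySem.Str.strip p.2
        if stripped ≠ "" then
          let acc1 := acc ++ stripped ++ "\n"
          if p.1 < (lines.length : Int) - 1 ∧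
              PySem.Str.strip (PySem.List.pyGetD lines (p.1 + 1) "") ≠ "" then
            acc1 ++ "\n"
          else acc1
        else if acc ≠ "" ∧ PySem.Str.endswith acc "\n\n" = false then acc ++ "\n"
        else acc) acc ((k : Int), l)).toList = pvStepA acc.toList l.toList (rest.map String.toList) := by
      dsimp only
      by_cases h1 : PySem.Str.strip l ≠ ""
      · rw [if_pos h1]
        have h1' : PySem.Chars.strip l.toList ≠ [] := by
          rw [Ne, ← PySem.Str.toList_strip, ← pv_str_eq_empty]; exact h1
        by_cases h2 : ((k : Int) < (lines.length : Int) - 1 ∧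
            PySem.Str.strip (PySem.List.pyGetD lines ((k : Int) + 1) "") ≠ "")
        · rw [if_pos h2]
          unfold pvStepA
          rw [if_pos (by simpa using h1'), if_pos (hcond2.mp h2)]
          simp [String.toList_append, PySem.Str.toList_strip, List.append_assoc]
        · rw [if_neg h2]
          unfold pvStepA
          rw [if_pos (by simpa using h1'), if_neg (fun hc => h2 (hcond2.mpr hc))]
          simp [String.toList_append, PySem.Str.toList_strip, List.append_assoc]
      · rw [if_neg h1]
        rw [not_not] at h1
        have h1' : ¬ PySem.Chars.strip l.toList ≠ [] := by
          rw [not_not, ← PySem.Str.toList_strip, h1]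
          rfl
        by_cases h3 : (acc ≠ "" ∧ PySem.Str.endswith acc "\n\n" = false)
        · rw [if_pos h3]
          unfold pvStepA
          rw [if_neg h1', if_pos]
          · simp [String.toList_append]
          · constructor
            · rw [Ne, ← pv_str_eq_empty]; exact h3.1
            · rw [← h3.2, PySem.Str.endswith_eq, pv_nlnl]
        · rw [if_neg h3]
          unfold pvStepA
          rw [if_neg h1', if_neg]
          intro hc
          apply h3
          constructor
          · rw [Ne, pv_str_eq_empty]; exact hc.1
          · rw [PySem.Str.endswith_eq, pv_nlnl]; exact hc.2
    have hcast : (k : Int) + 1 = ((k + 1 : Nat) : Int) := by push_cast; ring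
    rw [hcast]
    rw [ih (k + 1) _ hdropS]
    rw [List.map_cons, pvGA]
    congr 1

-- content list on the String side maps to pvC
theorem pv_content_map (lines : List String) :
    ((lines.map PySem.Str.strip).filter (fun s => s ≠ "")).map String.toList
      = pvC (lines.map String.toList) := by
  induction lines with
  | nil => simp [pvC]
  | cons l rest ih =>
    simp only [pvC, List.map_map, List.map_cons, List.filter_cons, decide_not] at ih ⊢
    by_cases h : PySem.Str.strip l = ""
    · have h' : PySem.Chars.strip l.toList = [] := by
        rw [← PySem.Str.toList_strip, h]
        rfl
      simp [h, h', ih]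
    · have h' : ¬ PySem.Chars.strip l.toList = [] := by
        rw [← PySem.Str.toList_strip, ← pv_str_eq_empty]; exact h
      simp [h, h', ih, PySem.Str.toList_strip]

-- ---- bridge: port B computes pvFB ----
theorem pv_bridgeB (text : String) :
    (normalize_linebreak_alt text).toList = pvFB ((PySem.Str.splitlines text).map String.toList) := by
  unfold normalize_linebreak_alt
  set lines := PySem.Str.splitlines text with hlines
  dsimp only
  by_cases h : (lines.map PySem.Str.strip).filter (fun s => s ≠ "") = []
  · rw [if_pos h]
    have h0 : pvC (lines.map String.toList) = [] := by
      rw [← pv_content_map, h]; rfl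
    simp [pvFB, h0]
  · rw [if_neg h]
    have hC : pvC (lines.map String.toList) ≠ [] := by
      rw [← pv_content_map]
      simpa using h
    have hlne : lines ≠ [] := by
      intro h0; apply h; rw [h0]; rfl
    have hgetlast : PySem.List.pyGetD lines (-1) "" = lines.getLast hlne :=
      PySem.List.pyGetD_neg_one lines "" hlne
    have hlast : (lines.map String.toList).getLast? = some (lines.getLast hlne).toList := by
      rw [List.getLast?_map]
      rw [List.getLast?_eq_some_getLast (h := hlne)]
      rfl
    have hjoin : (PySem.Str.join "\n\n" ((lines.map PySem.Str.strip).filter (fun s => s ≠ ""))).toList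
        = PySem.Chars.join ['\n', '\n'] (pvC (lines.map String.toList)) := by
      rw [PySem.Str.toList_join, pv_content_map, pv_nlnl]
    unfold pvFB
    rw [if_neg hC]
    by_cases h2 : PySem.Str.strip (PySem.List.pyGetD lines (-1) "") = ""
    · rw [if_pos h2]
      have h2' : PySem.Chars.strip (lines.getLast hlne).toList = [] := by
        rw [← PySem.Str.toList_strip, ← hgetlast, h2]
        rfl
      rw [show pvTrailB (lines.map String.toList) false = ['\n'] by
        unfold pvTrailB; rw [hlast]; simp [h2']]
      simp only [String.toList_append, hjoin]
      simp [List.append_assoc]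
    · rw [if_neg h2]
      have h2' : ¬ PySem.Chars.strip (lines.getLast hlne).toList = [] := by
        rw [← PySem.Str.toList_strip, ← hgetlast, ← pv_str_eq_empty]
        exact h2
      rw [show pvTrailB (lines.map String.toList) false = [] by
        unfold pvTrailB; rw [hlast]; simp [h2']]
      simp only [String.toList_append, hjoin]
      simp

-- ===== VERDICT (by name: the statement is the Claim_ definition above) =====
theorem normalize_linebreak_spec : Claim_equal_normalize_linebreak := by
  intro text _
  unfold Spec_normalize_linebreak
  apply String.toList_inj.mp
  rw [pv_bridgeB, ← pv_core]
  unfold normalize_linebreak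
  have := pv_bridgeA (PySem.Str.splitlines text) (PySem.Str.splitlines text) 0 "" (by simp)
  simpa using this
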